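-- pv_equiv track=rewrite | github.com/MTyyk/artfair | artworks/Artsy/artsy_paintings_FINAL.py | upgrade_url
-- ===== SOURCE A (Python) =====
-- def upgrade_url(url):
--     """
--     Artsy image URLs contain a version name like /medium/ or /normalized/.
--     Replace it with /larger/ to get the highest available resolution.
--     """
--     if not url:
--         return url
--     for v in ["normalized", "large_rectangle", "medium_rectangle",
--               "medium", "small", "square", "thumb", "tall"]:
--         url = url.replace(f"/{v}.", "/larger.")
--     url = url.replace(":version", "larger")
--     return url
-- ===== SOURCE B (Python) =====
-- _RULES = [
--     ("/normalized.", "/larger."),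
--     ("/large_rectangle.", "/larger."),
--     ("/medium_rectangle.", "/larger."),
--     ("/medium.", "/larger."),
--     ("/small.", "/larger."),
--     ("/square.", "/larger."),
--     ("/thumb.", "/larger."),
--     ("/tall.", "/larger."),
--     (":version", "larger"),
-- ]
--
--
-- def upgrade_url(url):
--     # Single left-to-right pass: at each position substitute the first
--     # matching token pattern (or ":version"), otherwise copy the character.
--     if not url:
--         return url
--     out = []
--     i = 0
--     n = len(url)
--     while i < n:
--         for pat, rep in _RULES:
--             if url.startswith(pat, i):
--                 out.append(rep)
--                 i += len(pat)
--                 break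
--         else:
--             out.append(url[i])
--             i += 1
--     return "".join(out)
-- ===== Notes on version B (the rewrite author's own statement) =====
-- stated objective: alternative
-- what changed: Replaced nine sequential full-string str.replace passes with one left-to-right scan over the string that substitutes the first matching rule at each position.
import Mathlib
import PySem

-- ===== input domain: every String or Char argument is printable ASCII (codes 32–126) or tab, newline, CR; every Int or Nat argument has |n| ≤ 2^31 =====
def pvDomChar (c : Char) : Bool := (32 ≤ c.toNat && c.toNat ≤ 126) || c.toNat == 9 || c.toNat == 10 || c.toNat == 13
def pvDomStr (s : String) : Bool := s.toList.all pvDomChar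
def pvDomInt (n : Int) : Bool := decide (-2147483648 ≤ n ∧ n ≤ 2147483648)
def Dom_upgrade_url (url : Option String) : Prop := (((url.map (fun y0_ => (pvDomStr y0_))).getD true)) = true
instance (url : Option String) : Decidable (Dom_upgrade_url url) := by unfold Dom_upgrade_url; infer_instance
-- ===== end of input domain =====

-- B replaces nine sequential full-string str.replace passes by one left-to-right scan
-- substituting the first matching token at each position (objective: alternative).

-- ===== PORT A =====
def upgrade_url (url : Option String) : Option String :=
  match url with
  | none => none
  | some s =>
    if s.isEmpty then some s
    else
      let u := ["normalized", "large_rectangle", "medium_rectangle",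
                "medium", "small", "square", "thumb", "tall"].foldl
        (fun u v => PySem.Str.replace u ("/" ++ v ++ ".") "/larger.") s
      some (PySem.Str.replace u ":version" "larger")

-- ===== PORT B =====
-- the rule table of Source B, as lists of characters
def pvRules : List (List Char × List Char) :=
  [("/normalized.".toList, "/larger.".toList),
   ("/large_rectangle.".toList, "/larger.".toList),
   ("/medium_rectangle.".toList, "/larger.".toList),
   ("/medium.".toList, "/larger.".toList),
   ("/small.".toList, "/larger.".toList),
   ("/square.".toList, "/larger.".toList),
   ("/thumb.".toList, "/larger.".toList),
   ("/tall.".toList, "/larger.".toList),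
   (":version".toList, "larger".toList)]

-- the while-loop of Source B: at each position, emit the first matching rule's
-- replacement and skip the pattern, else copy one character
def pvScan (rules : List (List Char × List Char)) : List Char → List Char
  | [] => []
  | c :: t =>
    match rules.find? (fun r => r.1.isPrefixOf (c :: t)) with
    | some r => r.2 ++ pvScan rules (t.drop (r.1.length - 1))
    | none => c :: pvScan rules t
termination_by l => l.length
decreasing_by
  · simp only [List.length_cons]
    have := List.length_drop (l := t) (i := r.1.length - 1)
    omega
  · simp

def upgrade_url_alt (url : Option String) : Option String :=
  match url with
  | none => none
  | some s =>
    if s.isEmpty then some s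
    else some (String.ofList (pvScan pvRules s.toList))

-- ===== PRECONDITION & SPEC =====
def Spec_upgrade_url (url : Option String) (out : Option String) : Prop := out = upgrade_url_alt url
instance (url : Option String) (out : Option String) : Decidable (Spec_upgrade_url url out) := by unfold Spec_upgrade_url; infer_instance

-- ===== CLAIM (what is proved, stated in full; the proofs are below) =====
def Claim_equal_upgrade_url : Prop := ∀ (url : Option String), Dom_upgrade_url url → Spec_upgrade_url url (upgrade_url url)

-- ===== LEMMAS AND PROOFS =====

-- structural model of Python's str.replace for a NONEMPTY pattern p0 :: p'
def pvRep (p0 : Char) (p' r : List Char) : List Char → List Char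
  | [] => []
  | c :: t =>
    if (p0 :: p').isPrefixOf (c :: t) then r ++ pvRep p0 p' r (t.drop p'.length)
    else c :: pvRep p0 p' r t
termination_by l => l.length
decreasing_by
  · simp only [List.length_cons]
    have := List.length_drop (l := t) (i := p'.length)
    omega
  · simp

theorem pvGo_eq (p0 : Char) (p' r : List Char) :
    ∀ (fuel : Nat) (l acc : List Char), l.length ≤ fuel →
      PySem.Chars.replace.go (p0 :: p') r fuel l acc = acc.reverse ++ pvRep p0 p' r l := by
  intro fuel
  induction fuel with
  | zero =>
    intro l acc h
    have hl : l = [] := by cases l <;> simp_all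
    subst hl
    simp [PySem.Chars.replace.go, pvRep]
  | succ n ih =>
    intro l acc h
    cases l with
    | nil => simp [PySem.Chars.replace.go, pvRep]
    | cons c t =>
      by_cases hp : (p0 :: p').isPrefixOf (c :: t)
      · rw [show PySem.Chars.replace.go (p0 :: p') r (n+1) (c :: t) acc
              = PySem.Chars.replace.go (p0 :: p') r n (List.drop (p0 :: p').length (c :: t)) (r.reverse ++ acc) by
            simp [PySem.Chars.replace.go, hp]]
        have hlen : (List.drop (p0 :: p').length (c :: t)).length ≤ n := by
          have := List.length_drop (l := (c :: t)) (i := (p0 :: p').length)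
          simp only [List.length_cons] at *
          omega
        rw [ih _ _ hlen]
        rw [show pvRep p0 p' r (c :: t) = r ++ pvRep p0 p' r (t.drop p'.length) by
          rw [pvRep]; simp [hp]]
        simp [List.drop_succ_cons]
      · rw [show PySem.Chars.replace.go (p0 :: p') r (n+1) (c :: t) acc
              = PySem.Chars.replace.go (p0 :: p') r n t (c :: acc) by
            simp [PySem.Chars.replace.go, hp]]
        have hlen : t.length ≤ n := by simp only [List.length_cons] at h; omega
        rw [ih _ _ hlen]
        rw [show pvRep p0 p' r (c :: t) = c :: pvRep p0 p' r t by rw [pvRep]; simp [hp]]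
        simp

-- Chars.replace with a nonempty pattern is pvRep
theorem pvReplace_eq_rep (p0 : Char) (p' r : List Char) (l : List Char) :
    PySem.Chars.replace l (p0 :: p') r = pvRep p0 p' r l := by
  rw [PySem.Chars.replace]
  simp only [List.isEmpty_cons, if_false, Bool.false_eq_true]
  rw [pvGo_eq p0 p' r l.length l [] (le_refl _)]
  simp

-- incomparable lists are not prefixes of each other's extensions
theorem pvSub {a b : List Char} (Z : List Char)
    (h1 : ¬ a <+: b) (h2 : ¬ b <+: a) : ¬ a <+: b ++ Z := by
  intro h
  rcases Nat.lt_or_ge b.length a.length with hlt | hge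
  · exact h2 (List.prefix_of_prefix_length_le (List.prefix_append b Z) h (le_of_lt hlt))
  · exact h1 (List.prefix_of_prefix_length_le h (List.prefix_append b Z) hge)

theorem pvScan_nil (l : List Char) : pvScan [] l = l := by
  induction l with
  | nil => simp [pvScan]
  | cons c t ih => simp [pvScan, ih]

-- pass-through: the scan copies a blocked segment verbatim
theorem pvPass (S : List (List Char × List Char)) (r W : List Char)
    (hb : ∀ q ∈ S, ∀ j < r.length, ¬ q.1 <+: r.drop j ∧ ¬ r.drop j <+: q.1) :
    pvScan S (r ++ W) = r ++ pvScan S W := by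
  induction r with
  | nil => simp
  | cons a r2 ih =>
    have hnone : (List.find? (fun x => x.1.isPrefixOf (a :: (r2 ++ W))) S) = none := by
      rw [List.find?_eq_none]
      intro q hq
      simp only [List.isPrefixOf_iff_prefix]
      intro hpre
      have h0 := hb q hq 0 (by simp)
      simp only [List.drop_zero] at h0
      exact pvSub W h0.1 h0.2 (by simpa using hpre)
    rw [List.cons_append, pvScan, hnone]
    rw [ih (fun q hq j hj => by
      have := hb q hq (j+1) (by simp; omega)
      simpa using this)]
    simp

-- pvRep creates no new front matches (for any suffix of any pattern of interest)
theorem pvCreate (p0 : Char) (p' r : List Char) (q : List Char)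
    (hr : ∀ m < q.length, ¬ q.drop m <+: r ∧ ¬ r <+: q.drop m) :
    ∀ (l : List Char), ∀ m < q.length, ¬ q.drop m <+: l → ¬ q.drop m <+: pvRep p0 p' r l := by
  have main : ∀ (n : Nat) (l : List Char), l.length ≤ n → ∀ m < q.length,
      ¬ q.drop m <+: l → ¬ q.drop m <+: pvRep p0 p' r l := by
    intro n
    induction n with
    | zero =>
      intro l hl m hm hnot
      have : l = [] := by cases l <;> simp_all
      subst this
      simpa [pvRep] using hnot
    | succ n ih =>
      intro l hl m hm hnot hcon
      cases l with
      | nil => exact hnot (by simpa [pvRep] using hcon)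
      | cons c t =>
        by_cases hp : (p0 :: p').isPrefixOf (c :: t)
        · rw [show pvRep p0 p' r (c :: t) = r ++ pvRep p0 p' r (t.drop p'.length) by
            rw [pvRep]; simp [hp]] at hcon
          exact pvSub _ (hr m hm).1 (hr m hm).2 hcon
        · rw [show pvRep p0 p' r (c :: t) = c :: pvRep p0 p' r t by
            rw [pvRep]; simp [hp]] at hcon
          cases hqd : q.drop m with
          | nil =>
            have : q.length - m = 0 := by
              have := congrArg List.length hqd; simpa using this
            omega
          | cons x xs =>
            rw [hqd] at hcon
            have hx : x = c ∧ xs <+: pvRep p0 p' r t := List.cons_prefix_cons.mp hcon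
            have hxs : xs = q.drop (m+1) := by
              have : q.drop (m+1) = (q.drop m).drop 1 := by rw [List.drop_drop]
              rw [this, hqd]; simp
            rcases Nat.lt_or_ge (m+1) q.length with h1 | h2
            · have hnot' : ¬ q.drop (m+1) <+: t := by
                intro hc
                apply hnot
                rw [hqd, hx.1]
                exact List.cons_prefix_cons.mpr ⟨rfl, hxs ▸ hc⟩
              exact ih t (by simp only [List.length_cons] at hl; omega) (m+1) h1 hnot'
                (hxs ▸ hx.2)
            · have hxsnil : xs = [] := by
                rw [hxs]
                have : q.length ≤ m + 1 := h2
                simp [List.drop_eq_nil_iff.mpr this]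
              apply hnot
              rw [hqd, hx.1, hxsnil]
              exact List.cons_prefix_cons.mpr ⟨rfl, List.nil_prefix⟩
  intro l
  exact main l.length l (le_refl _)

-- pvRep skips over a prefix occurrence of q whose interior cannot start a p-match
theorem pvSkip (p0 : Char) (p' r : List Char) (q : List Char)
    (hin : p0 ∉ q.drop 1) :
    ∀ (m : Nat) (l : List Char), m < q.length → q.drop m <+: l → ¬ (p0 :: p') <+: l →
      pvRep p0 p' r l = q.drop m ++ pvRep p0 p' r (l.drop (q.length - m)) := by
  have main : ∀ (n : Nat) (m : Nat) (l : List Char), l.length ≤ n → m < q.length →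
      q.drop m <+: l → ¬ (p0 :: p') <+: l →
      pvRep p0 p' r l = q.drop m ++ pvRep p0 p' r (l.drop (q.length - m)) := by
    intro n
    induction n with
    | zero =>
      intro m l hl hm hpre hnp
      have : l = [] := by cases l <;> simp_all
      subst this
      have : q.drop m = [] := List.prefix_nil.mp hpre
      have : q.length - m = 0 := by
        have := congrArg List.length this; simpa using this
      omega
    | succ n ih =>
      intro m l hl hm hpre hnp
      cases l with
      | nil =>
        have : q.drop m = [] := List.prefix_nil.mp hpre
        have : q.length - m = 0 := by
          have := congrArg List.length this; simpa using this
        omega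
      | cons c t =>
        have hpb : ¬ (p0 :: p').isPrefixOf (c :: t) = true :=
          fun h => hnp (List.isPrefixOf_iff_prefix.mp h)
        have hstep : pvRep p0 p' r (c :: t) = c :: pvRep p0 p' r t := by
          rw [pvRep, if_neg hpb]
        cases hqd : q.drop m with
        | nil =>
          have : q.length - m = 0 := by
            have := congrArg List.length hqd; simpa using this
          omega
        | cons x xs =>
          rw [hqd] at hpre
          have hx : x = c ∧ xs <+: t := List.cons_prefix_cons.mp hpre
          have hxs : xs = q.drop (m+1) := by
            have : q.drop (m+1) = (q.drop m).drop 1 := by rw [List.drop_drop]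
            rw [this, hqd]; simp
          rcases Nat.lt_or_ge (m+1) q.length with h1 | h2
          · -- interior: t starts with q[m+1] which is not p0
            have ht : ¬ (p0 :: p') <+: t := by
              intro hc
              cases htl : t with
              | nil => rw [htl] at hc; exact absurd (List.prefix_nil.mp hc) (by simp)
              | cons d t2 =>
                rw [htl] at hc
                have hd : p0 = d := (List.cons_prefix_cons.mp hc).1
                apply hin
                have hmem : d ∈ q.drop (m+1) := by
                  have hpref : q.drop (m+1) <+: t := hxs ▸ hx.2
                  rw [htl] at hpref
                  cases hqe : q.drop (m+1) with
                  | nil =>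
                    have : q.length - (m+1) = 0 := by
                      have := congrArg List.length hqe; simpa using this
                    omega
                  | cons e es =>
                    rw [hqe] at hpref
                    have hed : e = d := (List.cons_prefix_cons.mp hpref).1
                    rw [hed]; simp
                have hsub : q.drop (m+1) <:+ q.drop 1 := by
                  have : q.drop (m+1) = (q.drop 1).drop m := by rw [List.drop_drop]; ring_nf
                  rw [this]; exact List.drop_suffix m (q.drop 1)
                exact hd ▸ hsub.subset hmem
            have := ih (m+1) t (by simp only [List.length_cons] at hl; omega) h1
              (hxs ▸ hx.2) ht
            have harith : q.length - m = (q.length - (m+1)) + 1 := by omega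
            rw [hstep, this, hx.1, hxs, harith]
            simp [List.drop_succ_cons]
          · -- last char of q
            have hxsnil : xs = [] := by
              rw [hxs]
              exact List.drop_eq_nil_iff.mpr h2
            have harith : q.length - m = 1 := by
              have := congrArg List.length hqd
              simp [hxsnil] at this
              omega
            rw [hstep, hx.1, hxsnil, harith]
            simp
  intro m l
  exact main l.length m l (le_refl _)

-- main step: applying one replace then scanning with the remaining rules
-- equals scanning with the rule prepended
theorem pvMain (p0 : Char) (p' rp : List Char) (S : List (List Char × List Char))
    (hb : ∀ q ∈ S, ∀ j < rp.length, ¬ q.1 <+: rp.drop j ∧ ¬ rp.drop j <+: q.1)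
    (hc : ∀ q ∈ S, ∀ m < q.1.length, ¬ q.1.drop m <+: rp ∧ ¬ rp <+: q.1.drop m)
    (hin : ∀ q ∈ S, p0 ∉ q.1.drop 1)
    (hx : ∀ q ∈ S, ∀ q' ∈ S, q.1 ≠ q'.1 → ¬ q.1 <+: q'.1)
    (hne : ∀ q ∈ S, q.1 ≠ []) :
    ∀ l : List Char, pvScan S (pvRep p0 p' rp l) = pvScan (((p0 :: p'), rp) :: S) l := by
  have main : ∀ (n : Nat) (l : List Char), l.length ≤ n →
      pvScan S (pvRep p0 p' rp l) = pvScan (((p0 :: p'), rp) :: S) l := by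
    intro n
    induction n with
    | zero =>
      intro l hl
      have : l = [] := by cases l <;> simp_all
      subst this
      simp [pvRep, pvScan]
    | succ n ih =>
      intro l hl
      cases l with
      | nil => simp [pvRep, pvScan]
      | cons c t =>
        by_cases hp : (p0 :: p').isPrefixOf (c :: t)
        · -- the new rule matches: A replaces here, and it is the first rule of the scan
          rw [show pvRep p0 p' rp (c :: t) = rp ++ pvRep p0 p' rp (t.drop p'.length) by
            rw [pvRep]; simp [hp]]
          rw [pvPass S rp _ hb]
          rw [show pvScan (((p0 :: p'), rp) :: S) (c :: t)
                = rp ++ pvScan (((p0 :: p'), rp) :: S) (t.drop ((p0 :: p').length - 1)) by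
            rw [pvScan]; simp [List.find?, hp]]
          have hlen : (t.drop p'.length).length ≤ n := by
            have := List.length_drop (l := t) (i := p'.length)
            simp only [List.length_cons] at hl
            omega
          rw [ih _ hlen]
          simp
        · -- the new rule does not match here
          cases hf : List.find? (fun x => x.1.isPrefixOf (c :: t)) S with
          | none =>
            -- no rule matches: both sides copy the character
            have hrep : pvRep p0 p' rp (c :: t) = c :: pvRep p0 p' rp t := by
              rw [pvRep]; simp [hp]
            have hnone2 : List.find? (fun x => x.1.isPrefixOf (c :: pvRep p0 p' rp t)) S = none := by
              rw [List.find?_eq_none]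
              intro q hq
              simp only [List.isPrefixOf_iff_prefix]
              intro hcon
              have hq0 : 0 < q.1.length := by
                have := hne q hq; cases hq1 : q.1 with
                | nil => exact absurd hq1 this
                | cons _ _ => simp
              have hnm : ¬ q.1 <+: (c :: t) := by
                have := List.find?_eq_none.mp hf q hq
                simpa [List.isPrefixOf_iff_prefix] using this
              have := pvCreate p0 p' rp q.1
                (fun m hm => hc q hq m hm) (c :: t) 0 hq0 (by simpa using hnm)
              rw [hrep] at this
              exact this (by simpa using hcon)
            rw [hrep, pvScan, hnone2]
            rw [show pvScan (((p0 :: p'), rp) :: S) (c :: t) = c :: pvScan (((p0 :: p'), rp) :: S) t by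
              rw [pvScan]; simp [List.find?, hp, hf]]
            rw [ih t (by simp only [List.length_cons] at hl; omega)]
          | some q =>
            -- some later rule q is the first match
            have hqS : q ∈ S := List.mem_of_find?_eq_some hf
            have hqpre : q.1 <+: (c :: t) := by
              have := List.find?_some hf
              simpa [List.isPrefixOf_iff_prefix] using this
            have hq0 : 0 < q.1.length := by
              have := hne q hqS; cases hq1 : q.1 with
              | nil => exact absurd hq1 this
              | cons _ _ => simp
            -- A's replace skips over the q-occurrence untouched
            have hskip := pvSkip p0 p' rp q.1 (hin q hqS) 0 (c :: t) hq0
              (by simpa using hqpre) (fun hcon => hp (List.isPrefixOf_iff_prefix.mpr hcon))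
            simp only [List.drop_zero, Nat.sub_zero] at hskip
            rw [hskip]
            -- the scan with rules S on q.1 ++ Z fires rule q first
            obtain ⟨as, bs, hS, has⟩ := (List.find?_eq_some_iff_append.mp hf).2
            have hfind2 : List.find? (fun x => x.1.isPrefixOf (q.1 ++ pvRep p0 p' rp ((c :: t).drop q.1.length))) S = some q := by
              rw [List.find?_eq_some_iff_append]
              refine ⟨by simp [List.isPrefixOf_iff_prefix, List.prefix_append], as, bs, hS, ?_⟩
              intro a ha
              have hafail : ¬ a.1 <+: (c :: t) := by
                have h' := has a ha
                simp only [Bool.not_eq_true'] at h'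
                intro hcon
                rw [← List.isPrefixOf_iff_prefix] at hcon
                simp [h'] at hcon
              have haS : a ∈ S := by rw [hS]; exact List.mem_append_left _ ha
              have hnc : ¬ a.1 <+: (q.1 ++ pvRep p0 p' rp ((c :: t).drop q.1.length)) := by
                intro hcon
                rcases Nat.lt_or_ge q.1.length a.1.length with hlt | hle
                · have hq_a : q.1 <+: a.1 :=
                    List.prefix_of_prefix_length_le (List.prefix_append _ _) hcon (le_of_lt hlt)
                  by_cases heq : q.1 = a.1
                  · exact hafail (heq ▸ hqpre)
                  · exact (hx q hqS a haS heq hq_a).elim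
                · exact hafail ((List.prefix_of_prefix_length_le hcon (List.prefix_append _ _) hle).trans hqpre)
              cases hbool : a.1.isPrefixOf (q.1 ++ pvRep p0 p' rp ((c :: t).drop q.1.length)) with
              | false => simp only [Bool.not_false]
              | true => exact absurd (List.isPrefixOf_iff_prefix.mp hbool) hnc
            cases hq1 : q.1 with
            | nil => exact absurd hq1 (hne q hqS)
            | cons q0 qrest =>
              rw [hq1] at hfind2
              rw [List.cons_append] at hfind2
              rw [List.cons_append]
              rw [show pvScan S (q0 :: (qrest ++ pvRep p0 p' rp (List.drop (q0 :: qrest).length (c :: t))))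
                    = q.2 ++ pvScan S (List.drop (q.1.length - 1)
                        (qrest ++ pvRep p0 p' rp (List.drop (q0 :: qrest).length (c :: t)))) from by
                rw [pvScan, hfind2]]
              rw [hq1]
              have hdrop : (qrest ++ pvRep p0 p' rp ((c :: t).drop (q0 :: qrest).length)).drop ((q0 :: qrest).length - 1)
                  = pvRep p0 p' rp ((c :: t).drop (q0 :: qrest).length) := by
                have : (q0 :: qrest).length - 1 = qrest.length := by simp
                rw [this, List.drop_left]
              rw [hdrop]
              have hlen : ((c :: t).drop (q0 :: qrest).length).length ≤ n := by
                have := List.length_drop (l := (c :: t)) (i := (q0 :: qrest).length)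
                simp only [List.length_cons] at hl this ⊢
                omega
              rw [ih _ hlen]
              rw [show pvScan (((p0 :: p'), rp) :: S) (c :: t)
                    = q.2 ++ pvScan (((p0 :: p'), rp) :: S) (t.drop (q.1.length - 1)) by
                rw [pvScan]
                have : List.find? (fun x => x.1.isPrefixOf (c :: t)) (((p0 :: p'), rp) :: S) = some q := by
                  simp [List.find?, hp, hf]
                rw [this]]
              rw [hq1]
              simp [List.drop_succ_cons]
  intro l
  exact main l.length l (le_refl _)

-- the nine replaces of A, composed, equal B's single scan
theorem pvChain (l : List Char) :
    pvRep ':' "version".toList "larger".toList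
      (pvRep '/' "tall.".toList "/larger.".toList
      (pvRep '/' "thumb.".toList "/larger.".toList
      (pvRep '/' "square.".toList "/larger.".toList
      (pvRep '/' "small.".toList "/larger.".toList
      (pvRep '/' "medium.".toList "/larger.".toList
      (pvRep '/' "medium_rectangle.".toList "/larger.".toList
      (pvRep '/' "large_rectangle.".toList "/larger.".toList
      (pvRep '/' "normalized.".toList "/larger.".toList l)))))))) = pvScan pvRules l := by
  have h1 := pvMain '/' "normalized.".toList "/larger.".toList (pvRules.drop 1)
    (by decide) (by decide) (by decide) (by decide) (by decide)
  have h2 := pvMain '/' "large_rectangle.".toList "/larger.".toList (pvRules.drop 2)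
    (by decide) (by decide) (by decide) (by decide) (by decide)
  have h3 := pvMain '/' "medium_rectangle.".toList "/larger.".toList (pvRules.drop 3)
    (by decide) (by decide) (by decide) (by decide) (by decide)
  have h4 := pvMain '/' "medium.".toList "/larger.".toList (pvRules.drop 4)
    (by decide) (by decide) (by decide) (by decide) (by decide)
  have h5 := pvMain '/' "small.".toList "/larger.".toList (pvRules.drop 5)
    (by decide) (by decide) (by decide) (by decide) (by decide)
  have h6 := pvMain '/' "square.".toList "/larger.".toList (pvRules.drop 6)
    (by decide) (by decide) (by decide) (by decide) (by decide)
  have h7 := pvMain '/' "thumb.".toList "/larger.".toList (pvRules.drop 7)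
    (by decide) (by decide) (by decide) (by decide) (by decide)
  have h8 := pvMain '/' "tall.".toList "/larger.".toList (pvRules.drop 8)
    (by decide) (by decide) (by decide) (by decide) (by decide)
  have h9 := pvMain ':' "version".toList "larger".toList (pvRules.drop 9)
    (by decide) (by decide) (by decide) (by decide) (by decide)
  have e1 : (('/' :: "normalized.".toList, "/larger.".toList) : List Char × List Char) :: pvRules.drop 1 = pvRules := by decide
  have e2 : (('/' :: "large_rectangle.".toList, "/larger.".toList) : List Char × List Char) :: pvRules.drop 2 = pvRules.drop 1 := by decide
  have e3 : (('/' :: "medium_rectangle.".toList, "/larger.".toList) : List Char × List Char) :: pvRules.drop 3 = pvRules.drop 2 := by decide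
  have e4 : (('/' :: "medium.".toList, "/larger.".toList) : List Char × List Char) :: pvRules.drop 4 = pvRules.drop 3 := by decide
  have e5 : (('/' :: "small.".toList, "/larger.".toList) : List Char × List Char) :: pvRules.drop 5 = pvRules.drop 4 := by decide
  have e6 : (('/' :: "square.".toList, "/larger.".toList) : List Char × List Char) :: pvRules.drop 6 = pvRules.drop 5 := by decide
  have e7 : (('/' :: "thumb.".toList, "/larger.".toList) : List Char × List Char) :: pvRules.drop 7 = pvRules.drop 6 := by decide
  have e8 : (('/' :: "tall.".toList, "/larger.".toList) : List Char × List Char) :: pvRules.drop 8 = pvRules.drop 7 := by decide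
  have e9 : ((':' :: "version".toList, "larger".toList) : List Char × List Char) :: pvRules.drop 9 = pvRules.drop 8 := by decide
  rw [e1] at h1; rw [e2] at h2; rw [e3] at h3; rw [e4] at h4; rw [e5] at h5
  rw [e6] at h6; rw [e7] at h7; rw [e8] at h8; rw [e9] at h9
  rw [← h1 l, ← h2 _, ← h3 _, ← h4 _, ← h5 _, ← h6 _, ← h7 _, ← h8 _, ← h9 _]
  have h0 : pvRules.drop 9 = [] := by decide
  rw [h0, pvScan_nil]

-- ===== VERDICT (by name: the statement is the Claim_ definition above) =====
set_option maxHeartbeats 1000000 in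
theorem upgrade_url_spec : Claim_equal_upgrade_url := by
  intro url _
  unfold Spec_upgrade_url
  cases url with
  | none => rfl
  | some s =>
    simp only [upgrade_url, upgrade_url_alt]
    by_cases h : s.isEmpty
    · rw [if_pos h, if_pos h]
    · rw [if_neg h, if_neg h]
      simp only [List.foldl, PySem.Str.replace, String.toList_ofList]
      rw [show ("/" ++ "normalized" ++ ".").toList = '/' :: "normalized.".toList from by decide]
      rw [show ("/" ++ "large_rectangle" ++ ".").toList = '/' :: "large_rectangle.".toList from by decide]
      rw [show ("/" ++ "medium_rectangle" ++ ".").toList = '/' :: "medium_rectangle.".toList from by decide]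
      rw [show ("/" ++ "medium" ++ ".").toList = '/' :: "medium.".toList from by decide]
      rw [show ("/" ++ "small" ++ ".").toList = '/' :: "small.".toList from by decide]
      rw [show ("/" ++ "square" ++ ".").toList = '/' :: "square.".toList from by decide]
      rw [show ("/" ++ "thumb" ++ ".").toList = '/' :: "thumb.".toList from by decide]
      rw [show ("/" ++ "tall" ++ ".").toList = '/' :: "tall.".toList from by decide]
      rw [show (":version" : String).toList = ':' :: "version".toList from by decide]
      simp only [pvReplace_eq_rep]
      rw [pvChain s.toList]
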